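-- pv_equiv track=rewrite | github.com/shubhamjain-3120/ai-eval | app.py | is_markdown_table
-- ===== SOURCE A (Python) =====
-- def is_markdown_table(text):
--     """Check if the response contains a markdown table format"""
--     if not text:
--         return False
--
--     lines = text.split('\n')
--     table_row_count = 0
--
--     for line in lines:
--         stripped = line.strip()
--         # Check if line is a markdown table row (starts and ends with |)
--         if stripped.startswith('|') and stripped.endswith('|') and len(stripped) > 2:
--             table_row_count += 1
--         # Check if line is a table separator (contains dashes/colons between pipes)
--         elif stripped.startswith('|') and stripped.endswith('|') and ('-' in stripped or ':' in stripped):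
--             table_row_count += 1
--
--     # Require at least 2 table rows (header + at least one data row or separator)
--     return table_row_count >= 2
-- ===== SOURCE B (Python) =====
-- def is_markdown_table(text):
--     """Check if the response contains a markdown table format"""
--     def is_row(line):
--         s = line.strip()
--         return len(s) > 2 and s.startswith('|') and s.endswith('|')
--
--     def has_second_row(lines):
--         if not lines:
--             return False
--         if is_row(lines[0]):
--             return any(is_row(l) for l in lines[1:])
--         return has_second_row(lines[1:])
--
--     return has_second_row(text.split('\n'))
-- ===== Notes on version B (the rewrite author's own statement) =====
-- stated objective: simpler
-- what changed: Replaces A's count-all-matching-lines-then-compare loop (with its dead separator elif branch, which can never fire) by a recursive scan that finds the first table row and then checks whether any later line is also a row, short-circuiting.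
import Mathlib
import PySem

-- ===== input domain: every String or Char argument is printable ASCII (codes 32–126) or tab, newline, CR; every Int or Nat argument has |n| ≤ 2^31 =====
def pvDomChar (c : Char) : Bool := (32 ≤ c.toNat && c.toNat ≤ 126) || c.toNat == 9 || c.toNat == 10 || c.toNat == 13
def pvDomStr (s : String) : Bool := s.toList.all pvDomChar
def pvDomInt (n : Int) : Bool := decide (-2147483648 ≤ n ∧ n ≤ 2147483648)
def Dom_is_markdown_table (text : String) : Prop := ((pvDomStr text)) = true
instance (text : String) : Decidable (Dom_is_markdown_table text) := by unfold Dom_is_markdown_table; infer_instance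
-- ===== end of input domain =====

-- B replaces A's count-all-rows-then-compare loop (with its dead separator elif) by a recursive
-- find-first-row-then-any scan over the lines; same return value, simpler decomposition.

-- ===== PORT A =====
def is_markdown_table (text : String) : Bool :=
  -- `if not text: return False`
  if text == "" then false
  else
    -- text.split('\n'): sep is the nonempty literal "\n", so split? is always `some`
    let lines := (PySem.Str.split? text "\n").getD []
    let table_row_count := lines.foldl (fun acc line =>
      let stripped := PySem.Str.strip line
      if PySem.Str.startswith stripped "|" && PySem.Str.endswith stripped "|"
          && decide (PySem.Str.len stripped > 2) then acc + 1
      else if PySem.Str.startswith stripped "|" && PySem.Str.endswith stripped "|"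
          && (PySem.Str.isIn "-" stripped || PySem.Str.isIn ":" stripped) then acc + 1
      else acc) (0 : Int)
    decide (table_row_count ≥ 2)

-- ===== PORT B =====
def pvIsRow (line : String) : Bool :=
  let s := PySem.Str.strip line
  decide (PySem.Str.len s > 2) && PySem.Str.startswith s "|" && PySem.Str.endswith s "|"

def pvHasSecondRow : List String → Bool
  | [] => false
  | l :: ls => if pvIsRow l then ls.any pvIsRow else pvHasSecondRow ls

def is_markdown_table_alt (text : String) : Bool :=
  -- text.split('\n'): sep is the nonempty literal "\n", so split? is always `some`
  pvHasSecondRow ((PySem.Str.split? text "\n").getD [])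

-- ===== PRECONDITION & SPEC =====
def Spec_is_markdown_table (text : String) (out : Bool) : Prop := out = is_markdown_table_alt text
instance (text : String) (out : Bool) : Decidable (Spec_is_markdown_table text out) := by unfold Spec_is_markdown_table; infer_instance

-- ===== CLAIM (what is proved, stated in full; the proofs are below) =====
def Claim_equal_is_markdown_table : Prop := ∀ (text : String), Dom_is_markdown_table text → Spec_is_markdown_table text (is_markdown_table text)

-- ===== LEMMAS AND PROOFS =====

-- A's elif branch is dead: a stripped line that starts and ends with '|' but has length ≤ 2
-- is "|" or "||", which contains neither '-' nor ':'.
lemma pv_elif_dead (s : List Char)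
    (h1 : PySem.Chars.startswith s ['|'] = true)
    (h2 : PySem.Chars.endswith s ['|'] = true)
    (h3 : s.length ≤ 2) :
    (PySem.Chars.isIn ['-'] s || PySem.Chars.isIn [':'] s) = false := by
  rw [PySem.Chars.startswith_iff] at h1
  rw [PySem.Chars.endswith_iff] at h2
  match s, h3 with
  | [], _ => simp at h1
  | [a], _ =>
    have ha : a = '|' := by
      obtain ⟨t, ht⟩ := h1
      simp only [List.cons_append, List.cons.injEq] at ht
      exact ht.1.symm
    subst ha; decide
  | [a, b], _ =>
    have ha : a = '|' := by
      obtain ⟨t, ht⟩ := h1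
      simp only [List.cons_append, List.cons.injEq] at ht
      exact ht.1.symm
    have hb : b = '|' := by
      obtain ⟨u, hu⟩ := h2
      match u, hu with
      | [], hu => simp_all
      | [x], hu =>
        simp only [List.cons_append, List.nil_append, List.cons.injEq, and_true] at hu
        exact hu.2.symm
      | x :: y :: z :: w, hu =>
        have := congrArg List.length hu; simp at this
    subst ha hb; decide

-- A's per-line increment is B's single predicate.
lemma pv_step_eq (acc : Int) (line : String) :
    (if PySem.Str.startswith (PySem.Str.strip line) "|" && PySem.Str.endswith (PySem.Str.strip line) "|"
          && decide (PySem.Str.len (PySem.Str.strip line) > 2) then acc + 1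
      else if PySem.Str.startswith (PySem.Str.strip line) "|" && PySem.Str.endswith (PySem.Str.strip line) "|"
          && (PySem.Str.isIn "-" (PySem.Str.strip line) || PySem.Str.isIn ":" (PySem.Str.strip line)) then acc + 1
      else acc)
    = (if pvIsRow line then acc + 1 else acc) := by
  unfold pvIsRow
  generalize PySem.Str.strip line = s
  by_cases h1 : PySem.Chars.startswith s.toList ['|'] = true
  · by_cases h2 : PySem.Chars.endswith s.toList ['|'] = true
    · by_cases h3 : 2 < s.toList.length
      · have h3' : 2 < s.length := by rw [← String.length_toList]; omega
        simp [h1, h2, h3']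
      · have h3' : ¬ 2 < s.length := by rw [← String.length_toList]; omega
        have hd := pv_elif_dead s.toList h1 h2 (by omega)
        simp only [Bool.or_eq_false_iff] at hd
        simp [h1, h2, h3', hd.1, hd.2]
    · simp [h1, h2]
  · simp [h1]

-- counting ≥ 2 is "a row exists, and another after the first".
lemma pv_count_iff (lines : List String) :
    decide ((0 : Int) + (lines.countP pvIsRow : Nat) ≥ 2) = pvHasSecondRow lines := by
  induction lines with
  | nil => simp [pvHasSecondRow]
  | cons l ls ih =>
    by_cases h : pvIsRow l = true
    · have hc : (l :: ls).countP pvIsRow = ls.countP pvIsRow + 1 := by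
        simp [h]
      have hh : pvHasSecondRow (l :: ls) = ls.any pvIsRow := by
        simp [pvHasSecondRow, h]
      rw [hc, hh]
      rcases hb : ls.any pvIsRow with _ | _
      · have h0 : ls.countP pvIsRow = 0 := by
          rw [List.countP_eq_zero]
          intro a ha hpa
          have := List.any_eq_true.mpr ⟨a, ha, hpa⟩
          rw [hb] at this; cases this
        rw [h0]; decide
      · have h0 : 0 < ls.countP pvIsRow :=
          List.countP_pos_iff.mpr (by simpa [List.any_eq_true] using hb)
        simp only [ge_iff_le, decide_eq_true_eq]
        push_cast; omega
    · have hc : (l :: ls).countP pvIsRow = ls.countP pvIsRow := by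
        simp [h]
      have hh : pvHasSecondRow (l :: ls) = pvHasSecondRow ls := by
        simp [pvHasSecondRow, h]
      rw [hc, hh]; exact ih

-- ===== VERDICT (by name: the statement is the Claim_ definition above) =====
theorem is_markdown_table_spec : Claim_equal_is_markdown_table := by
  intro text _
  unfold Spec_is_markdown_table is_markdown_table is_markdown_table_alt
  by_cases he : text == ""
  · have : text = "" := by simpa using he
    subst this; decide
  · simp only [he]
    set lines := (PySem.Str.split? text "\n").getD [] with hl
    have hfold : lines.foldl (fun acc line =>
        let stripped := PySem.Str.strip line
        if PySem.Str.startswith stripped "|" && PySem.Str.endswith stripped "|"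
            && decide (PySem.Str.len stripped > 2) then acc + 1
        else if PySem.Str.startswith stripped "|" && PySem.Str.endswith stripped "|"
            && (PySem.Str.isIn "-" stripped || PySem.Str.isIn ":" stripped) then acc + 1
        else acc) (0 : Int)
        = lines.foldl (fun acc line => if pvIsRow line then acc + 1 else acc) (0 : Int) := by
      apply PySem.List.foldl_congr_mem
      intro acc line _
      exact pv_step_eq acc line
    rw [hfold, PySem.List.foldl_count_if]
    exact pv_count_iff lines
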